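-- pv_equiv track=rewrite | github.com/jabichebli/human-intent-estimator | training/rosbag_parser.py | build_label_segments
-- ===== SOURCE A (Python) =====
-- def build_label_segments(times_ns, labels):
--     """
--     Build contiguous segments of constant label.
--     Returns list of dicts with keys: label, start_ns, end_ns
--     """
--     segments = []
--     if len(times_ns) == 0:
--         return segments
--
--     start_idx = 0
--     current_label = labels[0]
--
--     for i in range(1, len(labels)):
--         if labels[i] != current_label:
--             segments.append({
--                 "label": int(current_label),
--                 "start_ns": int(times_ns[start_idx]),
--                 "end_ns": int(times_ns[i - 1]),
--             })
--             start_idx = i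
--             current_label = labels[i]
--
--     segments.append({
--         "label": int(current_label),
--         "start_ns": int(times_ns[start_idx]),
--         "end_ns": int(times_ns[-1]),
--     })
--     return segments
-- ===== SOURCE B (Python) =====
-- def build_label_segments(times_ns, labels):
--     """Boundary-index decomposition: compute all run-start indices first, then
--     emit one segment per consecutive pair of starts (plus the final run)."""
--     if len(times_ns) == 0:
--         return []
--     starts = [0] + [i for i in range(1, len(labels)) if labels[i] != labels[i - 1]]
--     segments = [
--         {"label": int(labels[s]), "start_ns": int(times_ns[s]), "end_ns": int(times_ns[nxt - 1])}
--         for s, nxt in zip(starts, starts[1:])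
--     ]
--     segments.append({
--         "label": int(labels[starts[-1]]),
--         "start_ns": int(times_ns[starts[-1]]),
--         "end_ns": int(times_ns[-1]),
--     })
--     return segments
-- ===== Notes on version B (the rewrite author's own statement) =====
-- stated objective: alternative
-- what changed: Replaces A's single stateful scan (carrying start_idx/current_label and emitting a segment at each change) with a two-phase decomposition: first compute the list of run-start indices, then emit one segment per consecutive pair of starts plus the final run.
import Mathlib
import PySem

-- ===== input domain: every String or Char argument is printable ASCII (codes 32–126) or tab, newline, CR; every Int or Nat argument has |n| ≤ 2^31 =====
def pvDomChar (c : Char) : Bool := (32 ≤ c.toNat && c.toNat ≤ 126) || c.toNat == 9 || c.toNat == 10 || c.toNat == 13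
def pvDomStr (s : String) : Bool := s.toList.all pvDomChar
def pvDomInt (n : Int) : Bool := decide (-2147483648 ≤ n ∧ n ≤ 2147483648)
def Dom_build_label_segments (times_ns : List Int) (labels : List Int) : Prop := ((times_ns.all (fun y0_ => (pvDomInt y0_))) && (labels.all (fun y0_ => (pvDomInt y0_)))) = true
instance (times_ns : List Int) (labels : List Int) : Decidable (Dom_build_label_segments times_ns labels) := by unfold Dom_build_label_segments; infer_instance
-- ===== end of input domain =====

-- B rebuilds the segments from the list of run-start indices (two-phase decomposition)
-- instead of A's single stateful scan; equivalence of the RETURN value is proved on Pre_.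

-- a segment dict {"label": lab, "start_ns": s, "end_ns": e} (insertion order)
def pvSeg (lab s e : Int) : List (String × Int) :=
  [("label", lab), ("start_ns", s), ("end_ns", e)]

-- ===== PORT A =====
-- loop body of A: state = (segments, start_idx, current_label)
def pvStep (times_ns labels : List Int) (acc : List (List (String × Int)) × Int × Int) (i : Int) :
    List (List (String × Int)) × Int × Int :=
  if PySem.List.pyGetD labels i 0 ≠ acc.2.2 then
    (acc.1 ++ [pvSeg acc.2.2 (PySem.List.pyGetD times_ns acc.2.1 0)
                 (PySem.List.pyGetD times_ns (i - 1) 0)],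
     i, PySem.List.pyGetD labels i 0)
  else acc

def build_label_segments (times_ns : List Int) (labels : List Int) : List (List (String × Int)) :=
  if times_ns.length = 0 then []
  else
    let st := (PySem.List.pyRange 1 (labels.length : Int) 1).foldl (pvStep times_ns labels)
      ([], 0, PySem.List.pyGetD labels 0 0)
    st.1 ++ [pvSeg st.2.2 (PySem.List.pyGetD times_ns st.2.1 0)
               (PySem.List.pyGetD times_ns (-1) 0)]

-- ===== PORT B =====
-- labels[i] != labels[i-1]
def pvChg (labels : List Int) (i : Int) : Bool :=
  decide (PySem.List.pyGetD labels i 0 ≠ PySem.List.pyGetD labels (i - 1) 0)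

-- inner segment for a consecutive pair (s, nxt) of run starts
def pvInner (times_ns labels : List Int) (p : Int × Int) : List (String × Int) :=
  pvSeg (PySem.List.pyGetD labels p.1 0) (PySem.List.pyGetD times_ns p.1 0)
    (PySem.List.pyGetD times_ns (p.2 - 1) 0)

def build_label_segments_alt (times_ns : List Int) (labels : List Int) : List (List (String × Int)) :=
  if times_ns.length = 0 then []
  else
    let starts := (0 : Int) :: (PySem.List.pyRange 1 (labels.length : Int) 1).filter (pvChg labels)
    ((starts.zip starts.tail).map (pvInner times_ns labels)) ++
      [pvSeg (PySem.List.pyGetD labels (PySem.List.pyGetD starts (-1) 0) 0)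
         (PySem.List.pyGetD times_ns (PySem.List.pyGetD starts (-1) 0) 0)
         (PySem.List.pyGetD times_ns (-1) 0)]

-- ===== PRECONDITION & SPEC =====
-- Pre_ = exactly the inputs where Python A returns (it raises IndexError when labels is
-- empty while times_ns is not, or when some label-change index falls outside times_ns).
def Pre_build_label_segments (times_ns : List Int) (labels : List Int) : Prop :=
  times_ns = [] ∨ (labels ≠ [] ∧ ∀ i, i < labels.length → 1 ≤ i →
    labels.getD i 0 ≠ labels.getD (i - 1) 0 → i < times_ns.length)
instance (times_ns : List Int) (labels : List Int) : Decidable (Pre_build_label_segments times_ns labels) := by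
  unfold Pre_build_label_segments; infer_instance

def pvWitness_build_label_segments : List Int × List Int := ([10, 20, 30], [5, 5, 7])

def Spec_build_label_segments (times_ns : List Int) (labels : List Int) (out : List (List (String × Int))) : Prop := out = build_label_segments_alt times_ns labels
instance (times_ns : List Int) (labels : List Int) (out : List (List (String × Int))) : Decidable (Spec_build_label_segments times_ns labels out) := by unfold Spec_build_label_segments; infer_instance

-- ===== CLAIM (what is proved, stated in full; the proofs are below) =====
def Claim_equal_build_label_segments : Prop := ∀ (times_ns : List Int) (labels : List Int), Dom_build_label_segments times_ns labels → Pre_build_label_segments times_ns labels → Spec_build_label_segments times_ns labels (build_label_segments times_ns labels)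

-- ===== LEMMAS AND PROOFS =====

-- last element of a nonempty cons, in the pyGetD (-1) form B uses
lemma pyGetD_neg_one_cons_of_ne (x : Int) (xs : List Int) (h : xs ≠ []) :
    PySem.List.pyGetD (x :: xs) (-1) 0 = PySem.List.pyGetD xs (-1) 0 := by
  rw [PySem.List.pyGetD_neg_one (x :: xs) 0 (by simp),
      PySem.List.pyGetD_neg_one xs 0 h, List.getLast_cons h]

-- appending one element to a nonempty list adds one consecutive pair
lemma zip_tail_append (xs : List Int) (y : Int) (h : xs ≠ []) :
    (xs ++ [y]).zip (xs ++ [y]).tail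
      = xs.zip xs.tail ++ [(PySem.List.pyGetD xs (-1) 0, y)] := by
  induction xs with
  | nil => exact absurd rfl h
  | cons x xs ih =>
    cases xs with
    | nil =>
      have hx : PySem.List.pyGetD [x] (-1) 0 = x := by
        rw [PySem.List.pyGetD_neg_one [x] 0 (by simp)]; simp
      simp [hx]
    | cons x2 rest =>
      have h2 : (x2 :: rest) ≠ [] := by simp
      have := ih h2
      simp only [List.cons_append, List.zip_cons_cons, List.tail_cons] at *
      rw [pyGetD_neg_one_cons_of_ne x (x2 :: rest) h2]
      rw [this]

-- the loop invariant: after processing range(1, k), A's state is exactly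
-- B's inner segments over the run starts seen so far, the last start, and its label;
-- moreover the previous label equals the current run's label.
lemma loop_inv (t l : List Int) (k : Nat) :
    ((PySem.List.pyRange 1 (k : Int) 1).foldl (pvStep t l) ([], 0, PySem.List.pyGetD l 0 0)
      = ((((0 : Int) :: (PySem.List.pyRange 1 (k : Int) 1).filter (pvChg l)).zip
            ((0 : Int) :: (PySem.List.pyRange 1 (k : Int) 1).filter (pvChg l)).tail).map (pvInner t l),
         PySem.List.pyGetD ((0 : Int) :: (PySem.List.pyRange 1 (k : Int) 1).filter (pvChg l)) (-1) 0,
         PySem.List.pyGetD l (PySem.List.pyGetD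
           ((0 : Int) :: (PySem.List.pyRange 1 (k : Int) 1).filter (pvChg l)) (-1) 0) 0))
    ∧ (1 ≤ k →
        PySem.List.pyGetD l ((k : Int) - 1) 0
          = PySem.List.pyGetD l (PySem.List.pyGetD
              ((0 : Int) :: (PySem.List.pyRange 1 (k : Int) 1).filter (pvChg l)) (-1) 0) 0) := by
  induction k with
  | zero =>
    have h0 : PySem.List.pyGetD [(0 : Int)] (-1) 0 = 0 := by decide
    simp [PySem.List.pyRange, h0]
  | succ k ih =>
    rcases Nat.eq_zero_or_pos k with hk0 | hk1
    · subst hk0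
      have h0 : PySem.List.pyGetD [(0 : Int)] (-1) 0 = 0 := by decide
      simp [PySem.List.pyRange, h0]
    · have hcast : (1 : Int) ≤ (k : Int) := by exact_mod_cast hk1
      have hrange : PySem.List.pyRange 1 ((k + 1 : Nat) : Int) 1
          = PySem.List.pyRange 1 (k : Int) 1 ++ [(k : Int)] := by
        push_cast
        exact PySem.List.pyRange_one_succ_right hcast
      obtain ⟨ihst, ihlab⟩ := ih
      have hlab := ihlab hk1
      have hklab : PySem.List.pyGetD l (((k + 1 : Nat) : Int) - 1) 0 = PySem.List.pyGetD l (k : Int) 0 := by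
        push_cast; norm_num
      by_cases hc : pvChg l (k : Int)
      · -- label changes at k: a new segment is emitted, k becomes the new start
        have hfilt : List.filter (pvChg l) [(k : Int)] = [(k : Int)] := by simp [hc]
        have hne : PySem.List.pyGetD l (k : Int) 0
            ≠ PySem.List.pyGetD l (PySem.List.pyGetD
                ((0 : Int) :: (PySem.List.pyRange 1 (k : Int) 1).filter (pvChg l)) (-1) 0) 0 := by
          rw [← hlab]; simpa [pvChg] using hc
        have hzip := zip_tail_append
          ((0 : Int) :: (PySem.List.pyRange 1 (k : Int) 1).filter (pvChg l)) (k : Int) (by simp)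
        have hlast := PySem.List.pyGetD_neg_one_append_singleton
          ((0 : Int) :: (PySem.List.pyRange 1 (k : Int) 1).filter (pvChg l)) (k : Int) (0 : Int)
        rw [hrange, List.foldl_append, List.filter_append, hfilt, ihst]
        simp only [List.foldl_cons, List.foldl_nil, ← List.cons_append] at *
        rw [hzip, hlast]
        constructor
        · rw [pvStep]
          simp only
          rw [if_pos hne, List.map_append]
          simp [pvInner]
        · intro _
          rw [hklab]
      · -- no change at k: state and starts are unchanged
        have hfilt : List.filter (pvChg l) [(k : Int)] = [] := by simp [hc]
        have heq : PySem.List.pyGetD l (k : Int) 0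
            = PySem.List.pyGetD l (PySem.List.pyGetD
                ((0 : Int) :: (PySem.List.pyRange 1 (k : Int) 1).filter (pvChg l)) (-1) 0) 0 := by
          rw [← hlab]; simpa [pvChg] using hc
        rw [hrange, List.foldl_append, List.filter_append, hfilt, List.append_nil, ihst]
        simp only [List.foldl_cons, List.foldl_nil]
        constructor
        · rw [pvStep]
          simp only
          rw [if_neg (by simpa using heq)]
        · intro _
          rw [hklab, heq]

-- unconditional equality of the two ports (they access identical indices everywhere)
lemma ports_eq (times_ns labels : List Int) :
    build_label_segments times_ns labels = build_label_segments_alt times_ns labels := by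
  unfold build_label_segments build_label_segments_alt
  by_cases h : times_ns.length = 0
  · simp [h]
  · rw [if_neg h, if_neg h]
    have := (loop_inv times_ns labels labels.length).1
    simp only at this
    rw [this]

-- ===== VERDICT (by name: the statement is the Claim_ definition above) =====
theorem build_label_segments_spec : Claim_equal_build_label_segments := by
  intro times_ns labels _ _
  exact (ports_eq times_ns labels).symm ▸ rfl
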